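-- pv_equiv track=rewrite | github.com/AnchalNigam/Code-Time | CP/watermeloncodechef.py | waterMelon
-- ===== SOURCE A (Python) =====
-- def waterMelon(intArr):
--   summation = sum(intArr)
--   if summation == 0:
--     return 'YES'
--   idx  = len(intArr)
--   newSummation = 0
--   while idx > 0:
--     newElem = intArr[idx-1]-idx
--     newSummation = sum(intArr) - intArr[idx-1] + newElem
--     if newSummation == 0:
--       return 'YES'
--     elif newSummation < 0:
--       newSummation = 0
--     else:
--       intArr[idx-1] = newElem
--     idx -= 1
--   return 'NO'
-- ===== SOURCE B (Python) =====
-- def waterMelon(intArr):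
--     # Return-value equivalent to A; does not mutate intArr (A overwrites elements in place).
--     s = sum(intArr)
--     if s == 0:
--         return 'YES'
--     for idx in range(len(intArr), 0, -1):
--         if s == idx:
--             return 'YES'
--         if s > idx:
--             s -= idx
--     return 'NO'
-- ===== Notes on version B (the rewrite author's own statement) =====
-- stated objective: faster
-- what changed: B keeps one running sum updated in O(1) per step (and never re-reads or mutates the list inside the loop), instead of A's re-summing the whole mutated list on every iteration.
import Mathlib
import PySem

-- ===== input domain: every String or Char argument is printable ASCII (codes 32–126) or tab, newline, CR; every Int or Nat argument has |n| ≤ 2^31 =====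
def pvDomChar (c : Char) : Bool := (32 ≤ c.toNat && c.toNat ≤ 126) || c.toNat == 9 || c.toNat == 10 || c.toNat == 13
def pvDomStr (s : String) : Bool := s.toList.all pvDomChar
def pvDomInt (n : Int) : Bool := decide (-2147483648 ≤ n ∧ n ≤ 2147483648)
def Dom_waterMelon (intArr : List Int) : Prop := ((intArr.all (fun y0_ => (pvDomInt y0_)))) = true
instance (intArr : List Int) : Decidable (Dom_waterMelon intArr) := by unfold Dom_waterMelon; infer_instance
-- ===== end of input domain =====

-- B maintains one running sum (O(n)) instead of A's per-iteration re-sum of the mutated list (O(n^2));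
-- A mutates its argument in place, B does not: the equivalence proved here is about the RETURN value only.

-- ===== PORT A =====
-- while idx > 0 loop of A; the list is mutated in place, carried as state here
def waterMelonLoop (arr : List Int) (idx : Nat) : Option String :=
  match idx with
  | 0 => none
  | i + 1 =>
    let newElem := PySem.List.pyGetD arr (Int.ofNat i) 0 - (Int.ofNat (i + 1))
    let newSummation := arr.sum - PySem.List.pyGetD arr (Int.ofNat i) 0 + newElem
    if newSummation = 0 then some "YES"
    else if newSummation < 0 then waterMelonLoop arr i
    else waterMelonLoop (arr.set i newElem) i

def waterMelon (intArr : List Int) : String :=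
  if intArr.sum = 0 then "YES"
  else (waterMelonLoop intArr intArr.length).getD "NO"

-- ===== PORT B =====
-- for idx in range(len(intArr), 0, -1) with running sum s
def waterMelonAltLoop (idx : Nat) (s : Int) : Bool :=
  match idx with
  | 0 => false
  | i + 1 =>
    if s = Int.ofNat (i + 1) then true
    else waterMelonAltLoop i (if s > Int.ofNat (i + 1) then s - Int.ofNat (i + 1) else s)

def waterMelon_alt (intArr : List Int) : String :=
  let s := intArr.sum
  if s = 0 then "YES"
  else if waterMelonAltLoop intArr.length s then "YES" else "NO"

-- ===== PRECONDITION & SPEC =====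
def Spec_waterMelon (intArr : List Int) (out : String) : Prop := out = waterMelon_alt intArr
instance (intArr : List Int) (out : String) : Decidable (Spec_waterMelon intArr out) := by unfold Spec_waterMelon; infer_instance

-- ===== CLAIM (what is proved, stated in full; the proofs are below) =====
def Claim_equal_waterMelon : Prop := ∀ (intArr : List Int), Dom_waterMelon intArr → Spec_waterMelon intArr (waterMelon intArr)

-- ===== LEMMAS AND PROOFS =====

theorem sum_set_eq (l : List Int) (i : Nat) (v : Int) (h : i < l.length) :
    (l.set i v).sum = l.sum - l[i] + v := by
  induction l generalizing i with
  | nil => simp at h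
  | cons a t ih =>
    cases i with
    | zero => simp [List.set]; ring
    | succ j =>
      simp only [List.set, List.sum_cons, List.getElem_cons_succ]
      rw [ih j (by simpa using h)]
      ring

theorem loop_eq_altLoop (idx : Nat) (arr : List Int) (h : idx ≤ arr.length) :
    waterMelonLoop arr idx = (if waterMelonAltLoop idx arr.sum then some "YES" else none) := by
  induction idx generalizing arr with
  | zero => simp [waterMelonLoop, waterMelonAltLoop]
  | succ i ih =>
    have hi : i < arr.length := h
    have hget : PySem.List.pyGetD arr (Int.ofNat i) 0 = arr[i] := by
      simp [PySem.List.pyGetD_natCast, hi]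
    unfold waterMelonLoop waterMelonAltLoop
    simp only [hget]
    have hsum : arr.sum - arr[i] + (arr[i] - Int.ofNat (i + 1)) = arr.sum - Int.ofNat (i + 1) := by ring
    rw [hsum]
    simp only [Int.ofNat_eq_natCast, Nat.cast_add, Nat.cast_one] at *
    rcases lt_trichotomy arr.sum ((i : Int) + 1) with hlt | heq | hgt
    · have hc1 : ¬ (arr.sum - ((i : Int) + 1) = 0) := by omega
      have hc2 : arr.sum ≤ (i : Int) := by omega
      have hne : ¬ (arr.sum = (i : Int) + 1) := by omega
      have hng : ¬ ((i : Int) + 1 < arr.sum) := by omega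
      simp [hc1, hc2, hne, hng, ih arr (Nat.le_of_succ_le h)]
    · simp [heq]
    · have hc1 : ¬ (arr.sum - ((i : Int) + 1) = 0) := by omega
      have hc2 : ¬ (arr.sum ≤ (i : Int)) := by omega
      have hne : ¬ (arr.sum = (i : Int) + 1) := by omega
      have hg : (i : Int) + 1 < arr.sum := by omega
      have hset : (arr.set i (arr[i] - ((i : Int) + 1))).sum = arr.sum - ((i : Int) + 1) := by
        rw [sum_set_eq arr i _ hi]; ring
      have ih2 := ih (arr.set i (arr[i] - ((i : Int) + 1))) (by simpa using Nat.le_of_succ_le h)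
      simp [hc1, hc2, hne, hg, ih2, hset]

-- ===== VERDICT (by name: the statement is the Claim_ definition above) =====
theorem waterMelon_spec : Claim_equal_waterMelon := by
  intro intArr _
  unfold Spec_waterMelon waterMelon waterMelon_alt
  by_cases h0 : intArr.sum = 0
  · simp [h0]
  · rw [if_neg h0, if_neg h0, loop_eq_altLoop intArr.length intArr (le_refl _)]
    by_cases hb : waterMelonAltLoop intArr.length intArr.sum <;> simp [hb]
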